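-- pv_equiv track=rewrite | github.com/guojiayi0331/CNN-LSTM_ZT_Gamma-Graphyne | smq01_tzbj_240629.py | extract_pattern_features
-- ===== SOURCE A (Python) =====
-- def extract_pattern_features(binary_code, pattern_lengths=[1, 2, 3, 4, 5, 6]):
--     features = {f'consecutive_1s_{length}': 0 for length in pattern_lengths}
--     features.update({f'consecutive_0s_{length}': 0 for length in pattern_lengths})
--
--     length = len(binary_code)
--     def find_consecutive_sequences(binary_code):
--         sequences = []
--         i = 0
--         while i < length:
--             current_value = binary_code[i]
--             start = i
--             while i < length and binary_code[i] == current_value: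
--                 i += 1
--             end = i
--             sequences.append((current_value, end - start))
--         return sequences
--
--     sequences = find_consecutive_sequences(binary_code)
--     for value, seq_length in sequences:
--         for pattern_length in pattern_lengths:
--             if seq_length == pattern_length:
--                 if value == 1:
--                     features[f'consecutive_1s_{pattern_length}'] += 1
--                 else:
--                     features[f'consecutive_0s_{pattern_length}'] += 1
--             if pattern_length == pattern_lengths[-1] and seq_length > pattern_length:
--                 if value == 1:
--                     features[f'consecutive_1s_{pattern_length}'] += 1
--                 else:
--                     features[f'consecutive_0s_{pattern_length}'] += 1
--
--     # 复杂组合模式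
--     complex_patterns = {
--         'pattern_10': [1, 0],
--         'pattern_01': [0, 1],
--         'pattern_101': [1, 0, 1],
--         'pattern_010': [0, 1, 0],
--         'pattern_1010': [1, 0, 1, 0],
--         'pattern_0110': [0, 1, 1, 0],
--         'pattern_1100': [1, 1, 0, 0],
--         'pattern_0011': [0, 0, 1, 1]
--     }
--
--     for pattern_name, pattern in complex_patterns.items():
--         pattern_length = len(pattern)
--         count_pattern = 0
--         i = 0
--
--         while i <= length - pattern_length:
--             # 检查当前窗口是否与模式匹配
--             if binary_code[i:i + pattern_length] == pattern:
--                 count_pattern += 1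
--                 # 跳过已匹配的模式，移动到模式末尾的下一个字符
--                 i += pattern_length
--             else:
--                 # 如果不匹配，移动一个字符
--                 i += 1
--
--         features[pattern_name] = count_pattern
--
--     return features
-- ===== SOURCE B (Python) =====
-- def count_nonoverlapping(seq, pattern):
--     # greedy non-overlapping scan with element-wise window check
--     count, i = 0, 0
--     m, n = len(pattern), len(seq)
--     while i + m <= n:
--         if all(seq[i + k] == pattern[k] for k in range(m)):
--             count += 1
--             i += m
--         else:
--             i += 1
--     return count
--
--
-- def extract_pattern_features(binary_code, pattern_lengths=[1, 2, 3, 4, 5, 6]):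
--     features = {f'consecutive_1s_{length}': 0 for length in pattern_lengths}
--     features.update({f'consecutive_0s_{length}': 0 for length in pattern_lengths})
--
--     # one pass: build the run list by extending its last entry
--     runs = []
--     for x in binary_code:
--         if runs and runs[-1][0] == x:
--             runs[-1][1] += 1
--         else:
--             runs.append([x, 1])
--
--     # frequency table: (is_one, run_length) -> number of such runs
--     run_counts = {}
--     for v, L in runs:
--         key = (v == 1, L)
--         run_counts[key] = run_counts.get(key, 0) + 1
--
--     if pattern_lengths:
--         last = pattern_lengths[-1]
--         over1 = sum(1 for v, L in runs if v == 1 and L > last)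
--         over0 = sum(1 for v, L in runs if v != 1 and L > last)
--         for pl in pattern_lengths:
--             features[f'consecutive_1s_{pl}'] += run_counts.get((True, pl), 0) + (over1 if pl == last else 0)
--             features[f'consecutive_0s_{pl}'] += run_counts.get((False, pl), 0) + (over0 if pl == last else 0)
--
--     complex_patterns = {
--         'pattern_10': [1, 0],
--         'pattern_01': [0, 1],
--         'pattern_101': [1, 0, 1],
--         'pattern_010': [0, 1, 0],
--         'pattern_1010': [1, 0, 1, 0],
--         'pattern_0110': [0, 1, 1, 0],
--         'pattern_1100': [1, 1, 0, 0],
--         'pattern_0011': [0, 0, 1, 1]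
--     }
--
--     for pattern_name, pattern in complex_patterns.items():
--         features[pattern_name] = count_nonoverlapping(binary_code, pattern)
--
--     return features
-- ===== Notes on version B (the rewrite author's own statement) =====
-- stated objective: alternative
-- what changed: Runs are built in one pass by extending the last run (instead of nested index-based while loops), tallied once into a (is_one, run_length) frequency table that is looked up per pattern length together with precomputed strictly-greater totals for the last bucket (instead of a per-run double loop incrementing the dict), and the greedy non-overlapping scan checks windows element-wise instead of slicing.
import Mathlib
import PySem

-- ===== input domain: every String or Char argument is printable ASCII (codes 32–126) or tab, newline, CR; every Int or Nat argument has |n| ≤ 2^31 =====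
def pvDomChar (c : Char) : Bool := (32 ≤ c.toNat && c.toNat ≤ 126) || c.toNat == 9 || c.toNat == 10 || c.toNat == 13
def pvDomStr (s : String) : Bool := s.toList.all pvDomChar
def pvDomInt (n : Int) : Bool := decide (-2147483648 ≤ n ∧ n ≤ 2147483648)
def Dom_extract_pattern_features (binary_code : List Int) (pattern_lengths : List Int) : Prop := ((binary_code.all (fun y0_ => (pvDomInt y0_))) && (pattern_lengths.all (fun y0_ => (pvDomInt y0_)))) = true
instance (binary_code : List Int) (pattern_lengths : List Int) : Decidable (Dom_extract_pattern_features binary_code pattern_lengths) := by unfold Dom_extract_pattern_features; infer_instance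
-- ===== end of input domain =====

-- B rebuilds the run list in one pass, tallies runs in a (is_one, length) frequency table consulted per
-- pattern length (plus precomputed strictly-greater totals for the last bucket), and checks scan windows
-- element-wise; objective: alternative decomposition, same exact return value.

-- ===== PORT A =====
-- A-side helpers
def pvKey1 (l : Int) : String := "consecutive_1s_" ++ PySem.Int.toStr l
def pvKey0 (l : Int) : String := "consecutive_0s_" ++ PySem.Int.toStr l
def pvComplexPatterns : List (String × List Int) :=
  [("pattern_10", [1, 0]), ("pattern_01", [0, 1]), ("pattern_101", [1, 0, 1]),
   ("pattern_010", [0, 1, 0]), ("pattern_1010", [1, 0, 1, 0]), ("pattern_0110", [0, 1, 1, 0]),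
   ("pattern_1100", [1, 1, 0, 0]), ("pattern_0011", [0, 0, 1, 1])]

def pvInnerA (bc : List Int) (n cur i : Int) : Int :=
  if h : i < n ∧ PySem.List.pyGetD bc i 0 == cur then pvInnerA bc n cur (i + 1) else i
termination_by (n - i).toNat
decreasing_by omega

lemma pvInnerA_ge (bc : List Int) (n cur : Int) : ∀ i, i ≤ pvInnerA bc n cur i := by
  intro i
  induction i using pvInnerA.induct bc n cur with
  | case1 i h ih => rw [pvInnerA, dif_pos h]; omega
  | case2 i h => rw [pvInnerA, dif_neg h]

lemma pvInnerA_gt (bc : List Int) (n i : Int) (h : i < n) :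
    i < pvInnerA bc n (PySem.List.pyGetD bc i 0) i := by
  have hc : i < n ∧ PySem.List.pyGetD bc i 0 == PySem.List.pyGetD bc i 0 := ⟨h, by simp⟩
  rw [pvInnerA, dif_pos hc]
  have := pvInnerA_ge bc n (PySem.List.pyGetD bc i 0) (i + 1)
  omega

-- (A's 'current_value'/'start'/'end' temporaries are inlined: start = i, end = the inner loop's result)
def pvOuterA (bc : List Int) (n i : Int) (acc : List (Int × Int)) : List (Int × Int) :=
  if h : i < n then
    pvOuterA bc n (pvInnerA bc n (PySem.List.pyGetD bc i 0) i)
      (acc ++ [(PySem.List.pyGetD bc i 0, pvInnerA bc n (PySem.List.pyGetD bc i 0) i - i)])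
  else acc
termination_by (n - i).toNat
decreasing_by
  have := pvInnerA_gt bc n i h
  omega

-- greedy non-overlapping scan of A (slice compare); 0 < pl is a totality guard only
def pvScanA (bc : List Int) (n pl : Int) (pat : List Int) (i cnt : Int) : Int :=
  if h : i ≤ n - pl ∧ 0 < pl then
    if PySem.List.slice bc (some i) (some (i + pl)) == pat then
      pvScanA bc n pl pat (i + pl) (cnt + 1)
    else
      pvScanA bc n pl pat (i + 1) cnt
  else cnt
termination_by (n - i).toNat
decreasing_by all_goals omega

def extract_pattern_features (binary_code : List Int) (pattern_lengths : List Int) : List (String × Int) :=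
  let d1 := pattern_lengths.foldl (fun d l => d.insert (pvKey1 l) (0 : Int)) PySem.Dict.empty
  let d2 := pattern_lengths.foldl (fun d l => d.insert (pvKey0 l) (0 : Int)) PySem.Dict.empty
  let features := d1.update d2.items
  let n := PySem.List.len binary_code
  let sequences := pvOuterA binary_code n 0 []
  let features := sequences.foldl (fun d r =>
    pattern_lengths.foldl (fun d pl =>
      let d := if r.2 == pl then
          (if r.1 == 1 then d.modify (pvKey1 pl) 0 (· + 1) else d.modify (pvKey0 pl) 0 (· + 1))
        else d
      if pl == PySem.List.pyGetD pattern_lengths (-1) 0 && decide (pl < r.2) then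
        (if r.1 == 1 then d.modify (pvKey1 pl) 0 (· + 1) else d.modify (pvKey0 pl) 0 (· + 1))
      else d) d) features
  let features := pvComplexPatterns.foldl
    (fun d p => d.insert p.1 (pvScanA binary_code n (PySem.List.len p.2) p.2 0 0)) features
  features.items

-- ===== PORT B =====
-- B-side helpers
def pvStepRun (acc : List (Int × Int)) (x : Int) : List (Int × Int) :=
  if acc ≠ [] then
    let lastp := PySem.List.pyGetD acc (-1) (0, 0)
    if lastp.1 == x then acc.dropLast ++ [(lastp.1, lastp.2 + 1)] else acc ++ [(x, 1)]
  else acc ++ [(x, 1)]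

def pvCountNOAux (seq pat : List Int) (m n i cnt : Int) : Int :=
  if h : i + m ≤ n ∧ 0 < m then
    if (PySem.List.pyRange 0 m 1).all
        (fun k => PySem.List.pyGetD seq (i + k) 0 == PySem.List.pyGetD pat k 0) then
      pvCountNOAux seq pat m n (i + m) (cnt + 1)
    else
      pvCountNOAux seq pat m n (i + 1) cnt
  else cnt
termination_by (n - i).toNat
decreasing_by all_goals omega

def pvCountNO (seq pat : List Int) : Int :=
  pvCountNOAux seq pat (PySem.List.len pat) (PySem.List.len seq) 0 0

def extract_pattern_features_alt (binary_code : List Int) (pattern_lengths : List Int) : List (String × Int) :=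
  let d1 := pattern_lengths.foldl (fun d l => d.insert (pvKey1 l) (0 : Int)) PySem.Dict.empty
  let d2 := pattern_lengths.foldl (fun d l => d.insert (pvKey0 l) (0 : Int)) PySem.Dict.empty
  let features := d1.update d2.items
  let runs := binary_code.foldl pvStepRun []
  let runCounts := runs.foldl
    (fun d r => d.insert (r.1 == 1, r.2) (d.getD (r.1 == 1, r.2) 0 + 1))
    (PySem.Dict.empty : PySem.Dict (Bool × Int) Int)
  let features :=
    if pattern_lengths ≠ [] then
      let last := PySem.List.pyGetD pattern_lengths (-1) 0
      let over1 : Int := runs.countP (fun r => r.1 == 1 && decide (last < r.2))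
      let over0 : Int := runs.countP (fun r => !(r.1 == 1) && decide (last < r.2))
      pattern_lengths.foldl (fun d pl =>
        let d := d.modify (pvKey1 pl) 0 (· + (runCounts.getD (true, pl) 0 + if pl == last then over1 else 0))
        d.modify (pvKey0 pl) 0 (· + (runCounts.getD (false, pl) 0 + if pl == last then over0 else 0))) features
    else features
  let features := pvComplexPatterns.foldl
    (fun d p => d.insert p.1 (pvCountNO binary_code p.2)) features
  features.items

-- ===== PRECONDITION & SPEC =====
def Spec_extract_pattern_features (binary_code : List Int) (pattern_lengths : List Int) (out : List (String × Int)) : Prop := out = extract_pattern_features_alt binary_code pattern_lengths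
instance (binary_code : List Int) (pattern_lengths : List Int) (out : List (String × Int)) : Decidable (Spec_extract_pattern_features binary_code pattern_lengths out) := by unfold Spec_extract_pattern_features; infer_instance

-- ===== CLAIM (what is proved, stated in full; the proofs are below) =====
def Claim_equal_extract_pattern_features : Prop := ∀ (binary_code : List Int) (pattern_lengths : List Int), Dom_extract_pattern_features binary_code pattern_lengths → Spec_extract_pattern_features binary_code pattern_lengths (extract_pattern_features binary_code pattern_lengths)

-- ===== LEMMAS AND PROOFS =====

-- canonical run decomposition both run computations are proved equal to
def runsOf : List Int → List (Int × Int)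
  | [] => []
  | x :: xs => (x, 1 + ((xs.takeWhile (· == x)).length : Int)) :: runsOf (xs.dropWhile (· == x))
termination_by l => l.length
decreasing_by
  have := List.length_dropWhile_le (· == x) xs
  simp only [List.length_cons]; omega

lemma dropWhile_eq_drop_takeWhile (p : Int → Bool) (xs : List Int) :
    xs.dropWhile p = xs.drop (xs.takeWhile p).length := by
  induction xs with
  | nil => rfl
  | cons x xs ih =>
    by_cases h : p x
    · simpa [List.takeWhile_cons, h] using ih
    · simp [List.dropWhile_cons, List.takeWhile_cons, h]

lemma length_takeWhile_le' (p : Int → Bool) (xs : List Int) :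
    (xs.takeWhile p).length ≤ xs.length :=
  List.Sublist.length_le (List.takeWhile_sublist p)

-- A's inner while loop computes the takeWhile length
lemma pvInnerA_char (bc : List Int) (cur : Int) :
    ∀ (fuel i : Nat), bc.length - i = fuel → i ≤ bc.length →
      pvInnerA bc (bc.length : Int) cur (i : Int) =
        (i : Int) + (((bc.drop i).takeWhile (· == cur)).length : Int) := by
  intro fuel
  induction fuel with
  | zero =>
    intro i h0 hle
    have hi : i = bc.length := by omega
    subst hi
    rw [pvInnerA, dif_neg (by simp)]
    simp [List.drop_length]
  | succ fuel ih =>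
    intro i h0 hle
    have hi : i < bc.length := by omega
    have hget : PySem.List.pyGetD bc (i : Int) 0 = bc[i] := by
      rw [PySem.List.pyGetD_natCast, List.getD_eq_getElem bc 0 hi]
    have hd : bc.drop i = bc[i] :: bc.drop (i + 1) := List.drop_eq_getElem_cons hi
    by_cases hb : bc[i] = cur
    · rw [pvInnerA, dif_pos ⟨by exact_mod_cast hi, by rw [hget]; exact beq_iff_eq.mpr hb⟩]
      have hcast : ((i : Int) + 1) = ((i + 1 : Nat) : Int) := by push_cast; ring
      rw [hcast, ih (i + 1) (by omega) (by omega), hd]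
      simp only [List.takeWhile_cons, beq_iff_eq, hb, if_pos, List.length_cons]
      push_cast; ring
    · rw [pvInnerA, dif_neg (by rw [hget]; simp [hb])]
      rw [hd]
      simp [List.takeWhile_cons, hb]

-- A's outer while loop computes runsOf
lemma pvOuterA_char (bc : List Int) :
    ∀ (fuel : Nat), ∀ (i : Nat) (acc : List (Int × Int)), bc.length - i ≤ fuel → i ≤ bc.length →
      pvOuterA bc (bc.length : Int) (i : Int) acc = acc ++ runsOf (bc.drop i) := by
  intro fuel
  induction fuel with
  | zero =>
    intro i acc h0 hle
    have hi : i = bc.length := by omega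
    subst hi
    rw [pvOuterA, dif_neg (by omega)]
    simp [List.drop_length, runsOf]
  | succ fuel ih =>
    intro i acc h0 hle
    by_cases hi : i < bc.length
    · rw [pvOuterA, dif_pos (by exact_mod_cast hi)]
      have hget : PySem.List.pyGetD bc (i : Int) 0 = bc[i] := by
        rw [PySem.List.pyGetD_natCast, List.getD_eq_getElem bc 0 hi]
      have hd : bc.drop i = bc[i] :: bc.drop (i + 1) := List.drop_eq_getElem_cons hi
      set t := ((bc.drop (i + 1)).takeWhile (· == bc[i])).length with ht
      have htle : t ≤ bc.length - (i + 1) := by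
        have := length_takeWhile_le' (· == bc[i]) (bc.drop (i + 1))
        simp only [List.length_drop] at this
        omega
      have hj := pvInnerA_char bc bc[i] (bc.length - i) i rfl (le_of_lt hi)
      have htw : ((bc.drop i).takeWhile (· == bc[i])).length = t + 1 := by
        rw [ht, hd, List.takeWhile_cons]
        simp
      rw [htw] at hj
      have hjv : pvInnerA bc (bc.length : Int) bc[i] (i : Int) = ((i + t + 1 : Nat) : Int) := by
        rw [hj]; push_cast; ring
      rw [hget, hjv, ih (i + t + 1) _ (by omega) (by omega)]
      have hdrop : bc.drop (i + t + 1) = (bc.drop (i + 1)).dropWhile (· == bc[i]) := by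
        rw [dropWhile_eq_drop_takeWhile, ← ht, List.drop_drop]
        congr 1; omega
      have hruns : runsOf (bc.drop i) =
          (bc[i], 1 + (t : Int)) :: runsOf ((bc.drop (i + 1)).dropWhile (· == bc[i])) := by
        rw [hd]; rw [runsOf]
      have hpair : ((i + t + 1 : Nat) : Int) - (i : Int) = 1 + (t : Int) := by push_cast; ring
      rw [hruns, ← hdrop, hpair]
      simp
    · have hieq : i = bc.length := by omega
      subst hieq
      rw [pvOuterA, dif_neg (by omega)]
      simp [List.drop_length, runsOf]

-- B's one-pass fold computes runsOf
lemma pvFoldRun_acc :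
    ∀ (xs : List Int) (acc : List (Int × Int)) (v L : Int),
      xs.foldl pvStepRun (acc ++ [(v, L)]) =
        acc ++ (v, L + ((xs.takeWhile (· == v)).length : Int)) :: runsOf (xs.dropWhile (· == v)) := by
  intro xs
  induction xs with
  | nil => intro acc v L; simp [runsOf]
  | cons x xs ih =>
    intro acc v L
    rw [List.foldl_cons]
    have hne : (acc ++ [(v, L)]) ≠ [] := by simp
    have hlast : PySem.List.pyGetD (acc ++ [(v, L)]) (-1) (0, 0) = (v, L) :=
      PySem.List.pyGetD_neg_one_append_singleton acc (v, L) (0, 0)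
    by_cases hx : v = x
    · have hstep : pvStepRun (acc ++ [(v, L)]) x = acc ++ [(v, L + 1)] := by
        rw [pvStepRun, if_pos hne, hlast]
        simp [hx]
      rw [hstep, ih acc v (L + 1)]
      have htk : (x :: xs).takeWhile (· == v) = x :: xs.takeWhile (· == v) := by
        simp [List.takeWhile_cons, hx]
      have hdw : (x :: xs).dropWhile (· == v) = xs.dropWhile (· == v) := by
        simp [List.dropWhile_cons, hx]
      rw [htk, hdw]
      simp only [List.length_cons]
      congr 2
      push_cast; ring
    · have hstep : pvStepRun (acc ++ [(v, L)]) x = (acc ++ [(v, L)]) ++ [(x, 1)] := by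
        rw [pvStepRun, if_pos hne, hlast]
        simp [hx]
      rw [hstep, ih (acc ++ [(v, L)]) x 1]
      have hx' : ¬ x = v := fun h => hx h.symm
      have htk : (x :: xs).takeWhile (· == v) = [] := by
        simp [List.takeWhile_cons, hx']
      have hdw : (x :: xs).dropWhile (· == v) = x :: xs := by
        simp [List.dropWhile_cons, hx']
      rw [htk, hdw]
      have hro : runsOf (x :: xs) =
          (x, 1 + ((xs.takeWhile (· == x)).length : Int)) :: runsOf (xs.dropWhile (· == x)) := by
        rw [runsOf]
      rw [hro]
      simp

lemma pvFoldRun (bc : List Int) : bc.foldl pvStepRun [] = runsOf bc := by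
  cases bc with
  | nil => simp [runsOf]
  | cons x xs =>
    rw [List.foldl_cons]
    have hstep : pvStepRun [] x = [] ++ [(x, 1)] := by rw [pvStepRun]; simp
    rw [hstep, pvFoldRun_acc xs [] x 1]
    rw [show runsOf (x :: xs) = (x, 1 + ((xs.takeWhile (· == x)).length : Int)) ::
      runsOf (xs.dropWhile (· == x)) from by rw [runsOf]]
    simp

-- abstract fold bookkeeping
lemma getD_fold_sum {X : Type} (k : String) (g : X → Int) :
    ∀ (L : List X) (f : PySem.Dict String Int → X → PySem.Dict String Int),
      (∀ d x, x ∈ L → ((f d x).getD k 0) = d.getD k 0 + g x) →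
      ∀ d, ((L.foldl f d).getD k 0) = d.getD k 0 + (L.map g).sum := by
  intro L
  induction L with
  | nil => intro f _ d; simp
  | cons x xs ih =>
    intro f hf d
    have h1 := hf d x (by simp)
    have h2 := ih f (fun d y hy => hf d y (by simp [hy])) (f d x)
    simp only [List.foldl_cons, List.map_cons, List.sum_cons] at *
    rw [h2, h1]; ring

lemma keys_fold_inv {X : Type} (K : List String) :
    ∀ (L : List X) (f : PySem.Dict String Int → X → PySem.Dict String Int),
      (∀ d x, x ∈ L → d.keys = K → (f d x).keys = K) →
      ∀ d, d.keys = K → (L.foldl f d).keys = K := by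
  intro L
  induction L with
  | nil => intro f _ d hd; simpa using hd
  | cons x xs ih =>
    intro f hf d hd
    exact ih f (fun d y hy => hf d y (by simp [hy])) (f d x) (hf d x (by simp) hd)

-- key-string facts
lemma pvKey1_ne_pvKey0 (a b : Int) : pvKey1 a ≠ pvKey0 b := by
  intro h
  have h2 := congrArg String.toList h
  rw [pvKey1, pvKey0, String.toList_append, String.toList_append,
    PySem.Int.toList_toStr, PySem.Int.toList_toStr] at h2
  have h3 := congrArg (fun l => l[12]?) h2
  simp only at h3
  rw [List.getElem?_append_left (by decide), List.getElem?_append_left (by decide)] at h3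
  exact absurd h3 (by decide)

lemma pvKey1_head (l : Int) : (pvKey1 l).toList[0]? = some 'c' := by
  rw [pvKey1, String.toList_append, List.getElem?_append_left (by decide)]
  decide

lemma pvKey0_head (l : Int) : (pvKey0 l).toList[0]? = some 'c' := by
  rw [pvKey0, String.toList_append, List.getElem?_append_left (by decide)]
  decide

-- the initial features dict (proof-side name for the shared init expression)
def pvD0 (pls : List Int) : PySem.Dict String Int :=
  (pls.foldl (fun d l => d.insert (pvKey1 l) (0 : Int)) PySem.Dict.empty).update
    ((pls.foldl (fun d l => d.insert (pvKey0 l) (0 : Int)) PySem.Dict.empty).items)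

lemma pvD0_keys_mem (pls : List Int) (k : String) :
    k ∈ (pvD0 pls).keys ↔ k ∈ pls.map pvKey1 ∨ k ∈ pls.map pvKey0 := by
  unfold pvD0
  have hupd : ∀ (d : PySem.Dict String Int) (ps : List (String × Int)),
      d.update ps = ps.foldl (fun d p => d.insert p.1 p.2) d := fun _ _ => rfl
  rw [hupd]
  rw [show (fun (d : PySem.Dict String Int) (p : String × Int) => d.insert p.1 p.2) =
    (fun d p => d.insert (Prod.fst p) ((fun (_ : PySem.Dict String Int) (p : String × Int) => p.2) d p)) from rfl]
  rw [PySem.Dict.keys_foldl_insert_key]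
  rw [PySem.Dict.keys_foldl_insert_key pls pvKey1 (fun _ _ => (0 : Int)) PySem.Dict.empty]
  have hk2 : ((pls.foldl (fun d l => d.insert (pvKey0 l) (0 : Int)) PySem.Dict.empty).items).map Prod.fst
      = (pls.foldl (fun d l => d.insert (pvKey0 l) (0 : Int)) PySem.Dict.empty).keys := rfl
  rw [hk2, PySem.Dict.keys_foldl_insert_key pls pvKey0 (fun _ _ => (0 : Int)) PySem.Dict.empty]
  rw [show (PySem.Dict.empty : PySem.Dict String Int).keys = [] from rfl]
  rw [PySem.Set.update_nil_left, PySem.Set.update_nil_left]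
  rw [PySem.Set.mem_update]
  simp [PySem.Set.mem_ofList]

lemma pvD0_keys_nodup (pls : List Int) : (pvD0 pls).keys.Nodup := by
  unfold pvD0
  exact PySem.Dict.nodup_keys_update _ _
    (PySem.Dict.nodup_keys_foldl_insert_key pls pvKey1 (fun _ _ => (0 : Int)) _
      PySem.Dict.nodup_keys_empty)

-- per-run, per-pattern-length contribution of A's double loop to key k
def pvKeyOf (v pl : Int) : String := if v = 1 then pvKey1 pl else pvKey0 pl

def pvContribA (k : String) (last : Int) (r : Int × Int) (pl : Int) : Int :=
  (if r.2 = pl ∧ k = pvKeyOf r.1 pl then 1 else 0) +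
  (if pl = last ∧ pl < r.2 ∧ k = pvKeyOf r.1 pl then 1 else 0)

lemma getD_bumpKey (d : PySem.Dict String Int) (v pl : Int) (k : String) :
    ((if v == 1 then d.modify (pvKey1 pl) 0 (· + 1) else d.modify (pvKey0 pl) 0 (· + 1)).getD k 0)
      = d.getD k 0 + (if k = pvKeyOf v pl then 1 else 0) := by
  by_cases hv : v = 1
  · rw [if_pos (by simp [hv]), PySem.Dict.getD_modify]
    unfold pvKeyOf
    rw [if_pos hv]
    split_ifs with h
    · subst h; ring
    · ring
  · rw [if_neg (by simp [hv]), PySem.Dict.getD_modify]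
    unfold pvKeyOf
    rw [if_neg hv]
    split_ifs with h
    · subst h; ring
    · ring

lemma keys_bumpKey (d : PySem.Dict String Int) (v pl : Int) (K : List String)
    (hd : d.keys = K) (h1 : pvKey1 pl ∈ K) (h0 : pvKey0 pl ∈ K) :
    (if v == 1 then d.modify (pvKey1 pl) 0 (· + 1) else d.modify (pvKey0 pl) 0 (· + 1)).keys = K := by
  have hmod : ∀ key : String, key ∈ K → (d.modify key 0 (· + 1)).keys = K := by
    intro key hk
    rw [PySem.Dict.keys_modify, PySem.Dict.keys_insert_of_contains _ _
      ((PySem.Dict.contains_iff_mem_keys d key).mpr (hd ▸ hk))]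
    exact hd
  by_cases hv : (v == 1 : Bool) <;> simp only [hv, ite_true, ite_false, Bool.false_eq_true,
    reduceIte] <;> [exact hmod _ h1; exact hmod _ h0]

-- getD through one iteration of A's inner loop body
lemma getD_innerA_step (pls : List Int) (k : String) (d : PySem.Dict String Int)
    (r : Int × Int) (pl : Int) :
    ((fun (d : PySem.Dict String Int) (pl : Int) =>
      let d := if r.2 == pl then
          (if r.1 == 1 then d.modify (pvKey1 pl) 0 (· + 1) else d.modify (pvKey0 pl) 0 (· + 1))
        else d
      if pl == PySem.List.pyGetD pls (-1) 0 && decide (pl < r.2) then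
        (if r.1 == 1 then d.modify (pvKey1 pl) 0 (· + 1) else d.modify (pvKey0 pl) 0 (· + 1))
      else d) d pl).getD k 0
    = d.getD k 0 + pvContribA k (PySem.List.pyGetD pls (-1) 0) r pl := by
  simp only []
  set last := PySem.List.pyGetD pls (-1) 0 with hlast
  set d1 := if r.2 == pl then
      (if r.1 == 1 then d.modify (pvKey1 pl) 0 (· + 1) else d.modify (pvKey0 pl) 0 (· + 1))
    else d with hd1
  have hg1 : d1.getD k 0 = d.getD k 0 + (if r.2 = pl ∧ k = pvKeyOf r.1 pl then 1 else 0) := by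
    by_cases h : r.2 = pl
    · rw [hd1, if_pos (by simp [h]), getD_bumpKey]
      simp [h]
    · rw [hd1, if_neg (by simp [h])]
      simp [h]
  unfold pvContribA
  by_cases h2 : (pl = last ∧ pl < r.2)
  · have hb : last < r.2 := h2.1 ▸ h2.2
    rw [if_pos (by simp [h2.1, hb]), getD_bumpKey, hg1]
    have h3 : (pl = last ∧ pl < r.2 ∧ k = pvKeyOf r.1 pl) = (k = pvKeyOf r.1 pl) :=
      propext ⟨fun h => h.2.2, fun h => ⟨h2.1, h2.2, h⟩⟩
    simp only [h3]
    ring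
  · rw [if_neg (by rcases not_and_or.mp h2 with h | h <;> simp [h]), hg1]
    have : ¬ (pl = last ∧ pl < r.2 ∧ k = pvKeyOf r.1 pl) := by tauto
    rw [if_neg this]
    ring

lemma keys_innerA_step (pls : List Int) (K : List String) (d : PySem.Dict String Int)
    (r : Int × Int) (pl : Int) (hd : d.keys = K) (h1 : pvKey1 pl ∈ K) (h0 : pvKey0 pl ∈ K) :
    ((fun (d : PySem.Dict String Int) (pl : Int) =>
      let d := if r.2 == pl then
          (if r.1 == 1 then d.modify (pvKey1 pl) 0 (· + 1) else d.modify (pvKey0 pl) 0 (· + 1))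
        else d
      if pl == PySem.List.pyGetD pls (-1) 0 && decide (pl < r.2) then
        (if r.1 == 1 then d.modify (pvKey1 pl) 0 (· + 1) else d.modify (pvKey0 pl) 0 (· + 1))
      else d) d pl).keys = K := by
  simp only []
  set d1 := if r.2 == pl then
      (if r.1 == 1 then d.modify (pvKey1 pl) 0 (· + 1) else d.modify (pvKey0 pl) 0 (· + 1))
    else d with hd1
  have hk1 : d1.keys = K := by
    by_cases h : (r.2 == pl : Bool)
    · rw [hd1, if_pos h]
      exact keys_bumpKey d r.1 pl K hd h1 h0
    · rw [hd1, if_neg h]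
      exact hd
  by_cases h : ((pl == PySem.List.pyGetD pls (-1) 0 && decide (pl < r.2)) : Bool)
  · rw [if_pos h]
    exact keys_bumpKey d1 r.1 pl K hk1 h1 h0
  · rw [if_neg h]
    exact hk1

-- getD through one iteration of B's per-length loop body
lemma getD_stepB (d : PySem.Dict String Int) (pl : Int) (k : String) (c1 c0 : Int) :
    (((d.modify (pvKey1 pl) 0 (· + c1)).modify (pvKey0 pl) 0 (· + c0)).getD k 0)
      = d.getD k 0 + ((if k = pvKey1 pl then c1 else 0) + (if k = pvKey0 pl then c0 else 0)) := by
  have hne : pvKey0 pl ≠ pvKey1 pl := fun h => pvKey1_ne_pvKey0 pl pl h.symm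
  by_cases h0 : k = pvKey0 pl
  · have h1 : k ≠ pvKey1 pl := fun h => pvKey1_ne_pvKey0 pl pl (h ▸ h0 ▸ rfl)
    simp [PySem.Dict.getD_modify, h0, h1, hne]
  · by_cases h1 : k = pvKey1 pl <;>
      simp [PySem.Dict.getD_modify, h0, h1, hne, pvKey1_ne_pvKey0 pl pl]

lemma keys_stepB (d : PySem.Dict String Int) (pl : Int) (K : List String) (c1 c0 : Int)
    (hd : d.keys = K) (h1 : pvKey1 pl ∈ K) (h0 : pvKey0 pl ∈ K) :
    ((d.modify (pvKey1 pl) 0 (· + c1)).modify (pvKey0 pl) 0 (· + c0)).keys = K := by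
  have hmod : ∀ (dd : PySem.Dict String Int) (key : String) (f : Int → Int), key ∈ K → dd.keys = K →
      (dd.modify key 0 f).keys = K := by
    intro dd key f hk hdd
    rw [PySem.Dict.keys_modify, PySem.Dict.keys_insert_of_contains _ _
      ((PySem.Dict.contains_iff_mem_keys dd key).mpr (hdd ▸ hk))]
    exact hdd
  exact hmod _ _ _ h0 (hmod _ _ _ h1 hd)

-- B's frequency table looked up is a countP over the runs
lemma runCounts_getD (runs : List (Int × Int)) (b : Bool) (pl : Int) :
    ((runs.foldl (fun d r => d.insert (r.1 == 1, r.2) (d.getD (r.1 == 1, r.2) 0 + 1))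
      (PySem.Dict.empty : PySem.Dict (Bool × Int) Int)).getD (b, pl) 0)
    = (runs.countP (fun r => ((r.1 == 1) == b) && (r.2 == pl)) : Int) := by
  rw [show runs.foldl (fun d r => d.insert (r.1 == 1, r.2) (d.getD (r.1 == 1, r.2) 0 + 1))
      (PySem.Dict.empty : PySem.Dict (Bool × Int) Int)
    = (runs.map (fun r => (r.1 == 1, r.2))).foldl (fun d x => d.insert x (d.getD x 0 + 1))
      PySem.Dict.empty from (List.foldl_map (f := fun (r : Int × Int) => (r.1 == 1, r.2))
        (g := fun (d : PySem.Dict (Bool × Int) Int) x => d.insert x (d.getD x 0 + 1))).symm]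
  rw [PySem.Dict.getD_foldl_insert_add_one, PySem.Dict.getD_empty, List.count_eq_countP,
    List.countP_map]
  norm_num
  congr 1

-- swapping a double sum
lemma sum_map_swap {α β : Type} (l1 : List α) (l2 : List β) (f : α → β → Int) :
    (l1.map (fun x => (l2.map (f x)).sum)).sum = (l2.map (fun y => (l1.map (fun x => f x y)).sum)).sum := by
  induction l1 with
  | nil => simp
  | cons x xs ih =>
    simp only [List.map_cons, List.sum_cons, ih]
    rw [← PySem.List.sum_map_add_int]

-- the per-pattern-length reconciliation of A's double count with B's table lookups
lemma perPl (runs : List (Int × Int)) (k : String) (last pl : Int) :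
    (runs.map (fun r => pvContribA k last r pl)).sum =
      (if k = pvKey1 pl then
        (runs.countP (fun r => (r.1 == 1) && (r.2 == pl)) : Int)
          + (if pl = last then (runs.countP (fun r => (r.1 == 1) && decide (last < r.2)) : Int) else 0)
      else 0)
      + (if k = pvKey0 pl then
        (runs.countP (fun r => (!(r.1 == 1)) && (r.2 == pl)) : Int)
          + (if pl = last then (runs.countP (fun r => (!(r.1 == 1)) && decide (last < r.2)) : Int) else 0)
      else 0) := by
  have hne := pvKey1_ne_pvKey0 pl pl
  induction runs with
  | nil => simp
  | cons r rs ih =>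
    simp only [List.map_cons, List.sum_cons, List.countP_cons, ih]
    push_cast
    by_cases h1 : r.1 = 1 <;> by_cases h2 : r.2 = pl <;> by_cases h3 : pl = last <;>
      by_cases h4 : pl < r.2 <;> by_cases hk1 : k = pvKey1 pl <;> by_cases hk0 : k = pvKey0 pl <;>
      simp_all [pvContribA, pvKeyOf] <;> omega

-- getD/keys across A's part-1 double loop (runs and init generalized)
lemma part1A_getD (pls : List Int) (runs : List (Int × Int)) (k : String)
    (d : PySem.Dict String Int) :
    ((runs.foldl (fun d r => pls.foldl (fun (d : PySem.Dict String Int) (pl : Int) =>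
      let d := if r.2 == pl then
          (if r.1 == 1 then d.modify (pvKey1 pl) 0 (· + 1) else d.modify (pvKey0 pl) 0 (· + 1))
        else d
      if pl == PySem.List.pyGetD pls (-1) 0 && decide (pl < r.2) then
        (if r.1 == 1 then d.modify (pvKey1 pl) 0 (· + 1) else d.modify (pvKey0 pl) 0 (· + 1))
      else d) d) d).getD k 0)
    = d.getD k 0 + (runs.map (fun r =>
        (pls.map (pvContribA k (PySem.List.pyGetD pls (-1) 0) r)).sum)).sum := by
  apply getD_fold_sum
  intro d r _
  apply getD_fold_sum
  intro d pl _
  exact getD_innerA_step pls k d r pl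

lemma part1A_keys (pls : List Int) (runs : List (Int × Int)) (K : List String)
    (d : PySem.Dict String Int) (hd : d.keys = K)
    (h1 : ∀ pl ∈ pls, pvKey1 pl ∈ K) (h0 : ∀ pl ∈ pls, pvKey0 pl ∈ K) :
    ((runs.foldl (fun d r => pls.foldl (fun (d : PySem.Dict String Int) (pl : Int) =>
      let d := if r.2 == pl then
          (if r.1 == 1 then d.modify (pvKey1 pl) 0 (· + 1) else d.modify (pvKey0 pl) 0 (· + 1))
        else d
      if pl == PySem.List.pyGetD pls (-1) 0 && decide (pl < r.2) then
        (if r.1 == 1 then d.modify (pvKey1 pl) 0 (· + 1) else d.modify (pvKey0 pl) 0 (· + 1))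
      else d) d) d).keys) = K := by
  apply keys_fold_inv
  · intro d r _ hdk
    apply keys_fold_inv
    · intro d pl hpl hdk'
      exact keys_innerA_step pls K d r pl hdk' (h1 pl hpl) (h0 pl hpl)
    · exact hdk
  · exact hd

-- getD/keys across B's per-length loop (amount terms generalized)
lemma part1B_getD (pls : List Int) (RC : PySem.Dict (Bool × Int) Int) (O1 O0 last : Int)
    (k : String) (d : PySem.Dict String Int) :
    ((pls.foldl (fun (d : PySem.Dict String Int) (pl : Int) =>
      let d := d.modify (pvKey1 pl) 0 (· + (RC.getD (true, pl) 0 + if pl == last then O1 else 0))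
      d.modify (pvKey0 pl) 0 (· + (RC.getD (false, pl) 0 + if pl == last then O0 else 0))) d).getD k 0)
    = d.getD k 0 + (pls.map (fun pl =>
        (if k = pvKey1 pl then RC.getD (true, pl) 0 + (if pl = last then O1 else 0) else 0)
        + (if k = pvKey0 pl then RC.getD (false, pl) 0 + (if pl = last then O0 else 0) else 0))).sum := by
  apply getD_fold_sum
  intro d pl _
  simp only []
  rw [getD_stepB]
  congr 2 <;> simp [beq_iff_eq]

lemma part1B_keys (pls : List Int) (RC : PySem.Dict (Bool × Int) Int) (O1 O0 last : Int)
    (K : List String) (d : PySem.Dict String Int) (hd : d.keys = K)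
    (h1 : ∀ pl ∈ pls, pvKey1 pl ∈ K) (h0 : ∀ pl ∈ pls, pvKey0 pl ∈ K) :
    ((pls.foldl (fun (d : PySem.Dict String Int) (pl : Int) =>
      let d := d.modify (pvKey1 pl) 0 (· + (RC.getD (true, pl) 0 + if pl == last then O1 else 0))
      d.modify (pvKey0 pl) 0 (· + (RC.getD (false, pl) 0 + if pl == last then O0 else 0))) d).keys) = K := by
  apply keys_fold_inv
  · intro d pl hpl hdk
    exact keys_stepB d pl K _ _ hdk (h1 pl hpl) (h0 pl hpl)
  · exact hd

-- part 2: the two window tests agree, hence the two scans agree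
lemma slice_eq_all (bc pat : List Int) (i : Int) (h0 : 0 ≤ i)
    (hm : i + (pat.length : Int) ≤ (bc.length : Int)) :
    (PySem.List.slice bc (some i) (some (i + (pat.length : Int))) == pat) =
      (PySem.List.pyRange 0 (pat.length : Int) 1).all
        (fun k => PySem.List.pyGetD bc (i + k) 0 == PySem.List.pyGetD pat k 0) := by
  rw [Bool.eq_iff_iff]
  simp only [beq_iff_eq, List.all_eq_true]
  rw [PySem.List.slice_toNat bc h0 (by omega)]
  have hlen2 : ((i + (pat.length : Int)).toNat - i.toNat) = pat.length := by omega
  rw [hlen2]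
  have hT : ((bc.drop i.toNat).take pat.length).length = pat.length := by
    simp [List.length_take, List.length_drop]; omega
  constructor
  · intro h x hx
    have hxr := (PySem.List.mem_pyRange_one).mp hx
    have hxn : x = ((x.toNat : Nat) : Int) := by omega
    have hb1 : i.toNat + x.toNat < bc.length := by omega
    have hb2 : x.toNat < pat.length := by omega
    rw [show i + x = ((i.toNat + x.toNat : Nat) : Int) by omega, hxn]
    rw [PySem.List.pyGetD_natCast, PySem.List.pyGetD_natCast]
    simp only [Int.toNat_natCast]
    rw [List.getD_eq_getElem bc 0 hb1, List.getD_eq_getElem pat 0 (by omega)]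
    have := congrArg (fun l => l[x.toNat]?) h
    simp only [List.getElem?_take, List.getElem?_drop] at this
    rw [List.getElem?_eq_getElem hb1, List.getElem?_eq_getElem (by omega : x.toNat < pat.length)] at this
    simpa [hb2] using this
  · intro h
    apply List.ext_getElem (by rw [hT])
    intro n h1 h2
    have hn : ((n : Nat) : Int) ∈ PySem.List.pyRange 0 (pat.length : Int) 1 := by
      rw [PySem.List.mem_pyRange_one]
      constructor <;> [omega; (rw [hT] at h1; exact_mod_cast h1)]
    have := h _ hn
    rw [show i + ((n : Nat) : Int) = ((i.toNat + n : Nat) : Int) by omega,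
      PySem.List.pyGetD_natCast, PySem.List.pyGetD_natCast] at this
    rw [hT] at h1
    rw [List.getD_eq_getElem bc 0 (by omega), List.getD_eq_getElem pat 0 h1] at this
    rw [List.getElem_take, List.getElem_drop]
    convert this using 2 <;> omega

lemma scanAux_eq (bc pat : List Int) :
    ∀ (fuel : Nat) (i cnt : Int), 0 ≤ i → (((bc.length : Int)) - i).toNat ≤ fuel →
      pvScanA bc (bc.length : Int) (pat.length : Int) pat i cnt
        = pvCountNOAux bc pat (pat.length : Int) (bc.length : Int) i cnt := by
  intro fuel
  induction fuel with
  | zero =>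
    intro i cnt h0 hf
    rw [pvScanA, dif_neg (by omega), pvCountNOAux, dif_neg (by omega)]
  | succ fuel ih =>
    intro i cnt h0 hf
    by_cases hg : (i ≤ (bc.length : Int) - (pat.length : Int) ∧ 0 < (pat.length : Int))
    · rw [pvScanA, dif_pos hg, pvCountNOAux, dif_pos (by omega)]
      rw [slice_eq_all bc pat i h0 (by omega)]
      by_cases hc : ((PySem.List.pyRange 0 (pat.length : Int) 1).all
          (fun k => PySem.List.pyGetD bc (i + k) 0 == PySem.List.pyGetD pat k 0) : Bool)
      · rw [if_pos hc, if_pos hc]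
        exact ih (i + (pat.length : Int)) (cnt + 1) (by omega) (by omega)
      · rw [if_neg hc, if_neg hc]
        exact ih (i + 1) cnt (by omega) (by omega)
    · rw [pvScanA, dif_neg hg, pvCountNOAux, dif_neg (by omega)]

lemma scan_eq_countNO (bc pat : List Int) :
    pvScanA bc (PySem.List.len bc) (PySem.List.len pat) pat 0 0 = pvCountNO bc pat := by
  rw [pvCountNO]
  simp only [PySem.List.len_eq]
  exact scanAux_eq bc pat ((bc.length : Int) - 0).toNat 0 0 (by omega) (by omega)

-- part 2: inserting the eight fresh pattern keys appends them
lemma part2_items (v : (String × List Int) → Int) (d : PySem.Dict String Int)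
    (hhead : ∀ k ∈ d.keys, k.toList[0]? = some 'c') :
    (pvComplexPatterns.foldl (fun dd p => dd.insert p.1 (v p)) d).items
      = d.items ++ pvComplexPatterns.map (fun p => (p.1, v p)) := by
  rw [show (fun (dd : PySem.Dict String Int) (p : String × List Int) => dd.insert p.1 (v p)) =
    (fun dd p => dd.insert (Prod.fst p) (v p)) from rfl]
  apply PySem.Dict.items_foldl_insert_fresh pvComplexPatterns Prod.fst v d
  · intro p hp
    rw [← Bool.not_eq_true, PySem.Dict.contains_iff_mem_keys]
    intro hmem
    have hc := hhead p.1 hmem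
    simp only [pvComplexPatterns, List.mem_cons, List.not_mem_nil, or_false] at hp
    rcases hp with h | h | h | h | h | h | h | h <;> subst h <;> exact absurd hc (by decide)
  · decide

-- the two part-1 dicts agree on keys and values, so the whole results agree
lemma tail_eq (bc pls : List Int) (dA dB : PySem.Dict String Int)
    (hkeysA : dA.keys = (pvD0 pls).keys) (hkeysB : dB.keys = (pvD0 pls).keys)
    (hget : ∀ k, dA.getD k 0 = dB.getD k 0) :
    (pvComplexPatterns.foldl (fun d p =>
        d.insert p.1 (pvScanA bc (bc.length : Int) (p.2.length : Int) p.2 0 0)) dA).items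
      = (pvComplexPatterns.foldl (fun d p => d.insert p.1 (pvCountNO bc p.2)) dB).items := by
  have hhead : ∀ k ∈ (pvD0 pls).keys, k.toList[0]? = some 'c' := by
    intro k hk
    rcases (pvD0_keys_mem pls k).mp hk with h | h <;> obtain ⟨l, _, rfl⟩ := List.mem_map.mp h
    · exact pvKey1_head l
    · exact pvKey0_head l
  rw [part2_items _ dA (by rw [hkeysA]; exact hhead),
    part2_items _ dB (by rw [hkeysB]; exact hhead)]
  congr 1
  · rw [PySem.Dict.items_eq_map_keys dA (by rw [hkeysA]; exact pvD0_keys_nodup pls) 0,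
      PySem.Dict.items_eq_map_keys dB (by rw [hkeysB]; exact pvD0_keys_nodup pls) 0,
      hkeysA, hkeysB]
    exact List.map_congr_left (fun k _ => by rw [hget k])
  · exact List.map_congr_left (fun p _ => by
      rw [show pvScanA bc (bc.length : Int) (p.2.length : Int) p.2 0 0 = pvCountNO bc p.2 from
        scan_eq_countNO bc p.2])

-- the main equality
theorem pv_main (bc pls : List Int) :
    extract_pattern_features bc pls = extract_pattern_features_alt bc pls := by
  have hseq : pvOuterA bc ((bc.length : Int)) 0 [] = runsOf bc := by
    have h := pvOuterA_char bc bc.length 0 [] (by omega) (by omega)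
    simpa using h
  have hm1 : ∀ pl ∈ pls, pvKey1 pl ∈ (pvD0 pls).keys := fun pl h =>
    (pvD0_keys_mem pls _).mpr (Or.inl (List.mem_map_of_mem h))
  have hm0 : ∀ pl ∈ pls, pvKey0 pl ∈ (pvD0 pls).keys := fun pl h =>
    (pvD0_keys_mem pls _).mpr (Or.inr (List.mem_map_of_mem h))
  unfold extract_pattern_features extract_pattern_features_alt
  simp only [PySem.List.len_eq, hseq, pvFoldRun bc]
  apply tail_eq bc pls
  · exact part1A_keys pls (runsOf bc) (pvD0 pls).keys (pvD0 pls) rfl hm1 hm0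
  · by_cases hpl : pls = []
    · subst hpl
      rw [if_neg (show ¬(([] : List Int) ≠ []) from fun h => h rfl)]
      rfl
    · rw [if_pos hpl]
      exact part1B_keys pls _ _ _ _ (pvD0 pls).keys (pvD0 pls) rfl hm1 hm0
  · intro k
    by_cases hpl : pls = []
    · subst hpl
      rw [if_neg (show ¬(([] : List Int) ≠ []) from fun h => h rfl)]
      simp only [List.foldl_nil]
      rw [PySem.List.foldl_ignore]
    · rw [if_pos hpl]
      refine Eq.trans (part1A_getD pls (runsOf bc) k (pvD0 pls)) ?_
      refine Eq.trans ?_ (part1B_getD pls _ _ _ _ k (pvD0 pls)).symm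
      congr 1
      rw [sum_map_swap]
      apply congrArg List.sum
      apply List.map_congr_left
      intro pl _
      rw [perPl (runsOf bc) k (PySem.List.pyGetD pls (-1) 0) pl,
        runCounts_getD (runsOf bc) true pl, runCounts_getD (runsOf bc) false pl]
      simp

-- ===== VERDICT (by name: the statement is the Claim_ definition above) =====
theorem extract_pattern_features_spec : Claim_equal_extract_pattern_features := by
  intro binary_code pattern_lengths _
  unfold Spec_extract_pattern_features
  exact pv_main binary_code pattern_lengths
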